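-- pv_equiv track=rewrite | github.com/twu31/Python-Machine-Problems | Recursion.py | deciding_votes_per_block
-- ===== SOURCE A (Python) =====
-- def deciding_votes_per_block(blocks):
--     to_return=[]
--     for i in range(len(blocks)):
--         tocheck=blocks.pop()
--         to_return.append(deciding_count(blocks,tocheck))
--         blocks.insert(0, tocheck)
--     to_return.reverse()
--     return to_return
--
-- def deciding_count(blocks1,tocheck, for_votes=0, against_votes=0):
--     if not blocks1 and ((tocheck + for_votes) < against_votes or (tocheck+against_votes) < for_votes):
--         return 0
--     elif not blocks1:
--         if ((tocheck+for_votes) >= against_votes ) or ((tocheck+against_votes) >= for_votes):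
--             return 1
--     else:
--         num=blocks1[0]
--         return deciding_count(blocks1[1:],tocheck,for_votes+num,against_votes) + deciding_count(blocks1[1:],tocheck,for_votes,against_votes+num)
-- ===== SOURCE B (Python) =====
-- def deciding_votes_per_block(blocks):
--     res = []
--     for i in range(len(blocks)):
--         c = blocks[i]
--         others = blocks[:i] + blocks[i + 1:]
--         t = sum(others)
--         # counts maps achievable for-vote sums of `others` to how many splits reach them
--         counts = {0: 1}
--         for v in others:
--             nxt = dict(counts)
--             for s, k in counts.items():
--                 nxt[s + v] = nxt.get(s + v, 0) + k
--             counts = nxt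
--         # a split with for-sum s is deciding iff |s - (t - s)| <= c, i.e. t - c <= 2*s <= t + c
--         res.append(sum(k for s, k in counts.items() if t - c <= 2 * s <= t + c))
--     return res
-- ===== Notes on version B (the rewrite author's own statement) =====
-- stated objective: alternative
-- what changed: Replaces the per-block 2^n-leaf split recursion by an iterative dictionary DP that counts how many splits reach each achievable for-vote sum and then sums the counts with t-c <= 2s <= t+c; duplicate subset sums collapse into one dict entry, so the per-block cost becomes O(n*|distinct subset sums|) instead of O(n*2^n) (both still exponential when all sums are distinct).
import Mathlib
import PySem

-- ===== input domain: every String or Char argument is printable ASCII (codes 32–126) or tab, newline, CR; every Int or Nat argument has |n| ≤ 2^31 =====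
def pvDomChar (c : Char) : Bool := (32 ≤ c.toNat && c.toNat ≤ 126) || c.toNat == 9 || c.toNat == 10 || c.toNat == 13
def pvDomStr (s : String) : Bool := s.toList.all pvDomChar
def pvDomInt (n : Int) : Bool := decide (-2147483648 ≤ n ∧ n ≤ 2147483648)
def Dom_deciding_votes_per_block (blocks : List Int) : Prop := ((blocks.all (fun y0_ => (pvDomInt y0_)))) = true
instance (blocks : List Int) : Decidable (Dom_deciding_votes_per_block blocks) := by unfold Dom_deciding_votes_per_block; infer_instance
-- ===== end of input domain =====

-- B replaces A's per-block 2^n split recursion by an iterative dict DP over achievable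
-- for-vote sums, then sums the counts in the deciding range (alternative algorithm).
-- A temporarily mutates `blocks` (pop/insert) but restores it before returning; the
-- equivalence proved here is about the return value.


-- ===== PORT A =====
def deciding_count (blocks1 : List Int) (tocheck for_votes against_votes : Int) : Int :=
  match blocks1 with
  | [] =>
    if tocheck + for_votes < against_votes ∨ tocheck + against_votes < for_votes then 0
    else if against_votes ≤ tocheck + for_votes ∨ for_votes ≤ tocheck + against_votes then 1
    else 0  -- Python would fall through (return None) here; this branch is unreachable
  | num :: rest =>
    deciding_count rest tocheck (for_votes + num) against_votes
      + deciding_count rest tocheck for_votes (against_votes + num)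

-- one iteration of A's loop: tocheck = blocks.pop(); append count; blocks.insert(0, tocheck)
def dvb_stepA (st : List Int × List Int) (_i : Int) : List Int × List Int :=
  match PySem.List.pop? st.1 with
  | none => st  -- IndexError: unreachable, the list length is restored every iteration
  | some (tocheck, rest) =>
    (PySem.List.insert rest 0 tocheck, st.2 ++ [deciding_count rest tocheck 0 0])

def deciding_votes_per_block (blocks : List Int) : List Int :=
  ((PySem.List.pyRange 0 (blocks.length : Int) 1).foldl dvb_stepA (blocks, [])).2.reverse

-- ===== PORT B =====
-- one step of B's inner dict loop: nxt[s + v] = nxt.get(s + v, 0) + k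
def dvb_shift (v : Int) (nxt : PySem.Dict Int Int) (p : Int × Int) : PySem.Dict Int Int :=
  nxt.insert (p.1 + v) (nxt.getD (p.1 + v) 0 + p.2)

-- B's loop body for index i (the code inside `for i in range(len(blocks))`)
def dvb_entry (blocks : List Int) (i : Int) : Int :=
  let c := PySem.List.pyGetD blocks i 0  -- blocks[i]; i is in range, so the default is never used
  let others := PySem.List.slice blocks none (some i)
                  ++ PySem.List.slice blocks (some (i + 1)) none
  let t := others.sum
  let counts := others.foldl
    (fun counts v => counts.items.foldl (dvb_shift v) counts)  -- nxt = dict(counts); then add the shifted entries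
    (PySem.Dict.ofList [(0, 1)])
  counts.items.foldl
    (fun acc p => if t - c ≤ 2 * p.1 ∧ 2 * p.1 ≤ t + c then acc + p.2 else acc) 0

def deciding_votes_per_block_alt (blocks : List Int) : List Int :=
  (PySem.List.pyRange 0 (blocks.length : Int) 1).foldl
    (fun res i => res ++ [dvb_entry blocks i]) []

-- ===== PRECONDITION & SPEC =====
def Spec_deciding_votes_per_block (blocks : List Int) (out : List Int) : Prop := out = deciding_votes_per_block_alt blocks
instance (blocks : List Int) (out : List Int) : Decidable (Spec_deciding_votes_per_block blocks out) := by unfold Spec_deciding_votes_per_block; infer_instance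

-- ===== CLAIM (what is proved, stated in full; the proofs are below) =====
def Claim_equal_deciding_votes_per_block : Prop := ∀ (blocks : List Int), Dom_deciding_votes_per_block blocks → Spec_deciding_votes_per_block blocks (deciding_votes_per_block blocks)

-- ===== LEMMAS AND PROOFS =====

-- all 2^n subset sums of a list (the possible "for"-vote totals of the splits)
def subsetSums : List Int → List Int
  | [] => [0]
  | v :: r => (subsetSums r).map (· + v) ++ subsetSums r

-- A's leaf test, as a predicate on the for-sum s (t = total of the remaining blocks)
def okPred (c f a t s : Int) : Bool := decide (a + (t - s) ≤ c + f + s ∧ f + s ≤ c + a + (t - s))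

theorem deciding_count_eq_countP (l : List Int) (c : Int) : ∀ f a,
    deciding_count l c f a = ((subsetSums l).countP (okPred c f a l.sum) : Int) := by
  induction l with
  | nil =>
    intro f a
    simp only [deciding_count, subsetSums, List.sum_nil, List.countP_cons, List.countP_nil, okPred]
    split_ifs with h1 h2 <;> simp_all <;> omega
  | cons v r ih =>
    intro f a
    simp only [deciding_count, subsetSums, List.sum_cons, List.countP_append, List.countP_map,
      ih (f + v) a, ih f (a + v)]
    have h1 : (okPred c f a (v + r.sum)) ∘ (· + v) = okPred c (f + v) a r.sum := by
      funext s; simp only [Function.comp_apply, okPred]; rw [decide_eq_decide]; omega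
    have h2 : okPred c f a (v + r.sum) = okPred c f (a + v) r.sum := by
      funext s; simp only [okPred]; rw [decide_eq_decide]; omega
    rw [h1, h2]; push_cast; ring

theorem subsetSums_perm {l l' : List Int} (h : l.Perm l') :
    (subsetSums l).Perm (subsetSums l') := by
  induction h with
  | nil => exact List.Perm.refl _
  | cons x h ih => exact (ih.map _).append ih
  | swap x y l =>
    simp only [subsetSums, List.map_append, List.map_map, List.append_assoc]
    have e : ((· + y) ∘ (· + x) : Int → Int) = ((· + x) ∘ (· + y)) := by
      funext s; simp only [Function.comp_apply]; ring
    rw [e]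
    exact (List.Perm.refl _).append (List.perm_append_comm_assoc _ _ _)
  | trans h1 h2 ih1 ih2 => exact ih1.trans ih2

-- Σ of the values of an item list whose key satisfies P
def itemSum (P : Int → Bool) (l : List (Int × Int)) : Int :=
  (l.map (fun p => if P p.1 then p.2 else 0)).sum

theorem itemSum_insert_add (d : PySem.Dict Int Int) (hnd : d.keys.Nodup)
    (k m : Int) (P : Int → Bool) :
    itemSum P (d.insert k (d.getD k 0 + m)).items
      = itemSum P d.items + (if P k then m else 0) := by
  obtain ⟨l⟩ := d
  simp only [PySem.Dict.keys] at *
  induction l with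
  | nil =>
    simp [PySem.Dict.insert, PySem.Dict.contains, PySem.Dict.getD, PySem.Dict.get?, itemSum]
  | cons hd tl ih =>
    obtain ⟨k0, v0⟩ := hd
    simp only [List.map_cons, List.nodup_cons] at hnd
    by_cases hk : k0 = k
    · subst hk
      have hnotin : ∀ p ∈ tl, (p.1 == k0) = false := by
        intro p hp
        simp only [beq_eq_false_iff_ne, ne_eq]
        intro e; exact hnd.1 (e ▸ List.mem_map_of_mem hp)
      have hins : ((PySem.Dict.mk ((k0, v0) :: tl)).insert k0
            ((PySem.Dict.mk ((k0, v0) :: tl)).getD k0 0 + m)).items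
          = (k0, v0 + m) :: tl := by
        simp only [PySem.Dict.insert, PySem.Dict.contains, PySem.Dict.getD, PySem.Dict.get?,
          List.any_cons, beq_self_eq_true, Bool.true_or, if_true, List.map_cons,
          List.find?_cons_of_pos, Option.map_some, Option.getD_some]
        congr 1
        rw [List.map_congr_left (g := id) (fun p hp => by simp [hnotin p hp]), List.map_id]
      rw [hins]
      simp only [itemSum, List.map_cons, List.sum_cons]
      split <;> ring
    · have hbeq : (k0 == k) = false := by simpa using hk
      have key : ((PySem.Dict.mk ((k0, v0) :: tl)).insert k
            ((PySem.Dict.mk ((k0, v0) :: tl)).getD k 0 + m)).items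
          = (k0, v0) :: ((PySem.Dict.mk tl).insert k ((PySem.Dict.mk tl).getD k 0 + m)).items := by
        simp only [PySem.Dict.insert, PySem.Dict.contains, PySem.Dict.getD, PySem.Dict.get?,
          List.any_cons, hbeq, Bool.false_or, List.map_cons]
        split <;> simp [hbeq]
      rw [key]
      simp only [itemSum, List.map_cons, List.sum_cons] at *
      rw [ih hnd.2]
      ring

theorem fold_shift (v : Int) (pr : List (Int × Int)) :
    ∀ (d : PySem.Dict Int Int), d.keys.Nodup →
    (pr.foldl (dvb_shift v) d).keys.Nodup ∧
    ∀ P : Int → Bool, itemSum P (pr.foldl (dvb_shift v) d).items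
      = itemSum P d.items + itemSum (fun s => P (s + v)) pr := by
  induction pr with
  | nil => intro d hnd; exact ⟨hnd, fun P => by simp [itemSum]⟩
  | cons p pr ih =>
    intro d hnd
    have hnd' : (dvb_shift v d p).keys.Nodup := PySem.Dict.nodup_keys_insert _ _ _ hnd
    obtain ⟨hn, hs⟩ := ih (dvb_shift v d p) hnd'
    refine ⟨hn, fun P => ?_⟩
    simp only [List.foldl_cons]
    rw [hs P]
    rw [show dvb_shift v d p = d.insert (p.1 + v) (d.getD (p.1 + v) 0 + p.2) from rfl,
      itemSum_insert_add d hnd]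
    simp only [itemSum, List.map_cons, List.sum_cons]
    ring

theorem counts_fold (l : List Int) :
    ∀ (d : PySem.Dict Int Int), d.keys.Nodup →
    ((l.foldl (fun c v => c.items.foldl (dvb_shift v) c) d).keys.Nodup) ∧
    ∀ P : Int → Bool, itemSum P (l.foldl (fun c v => c.items.foldl (dvb_shift v) c) d).items
      = ((subsetSums l).map (fun u => itemSum (fun s0 => P (s0 + u)) d.items)).sum := by
  induction l with
  | nil =>
    intro d hnd
    refine ⟨hnd, fun P => ?_⟩
    simp [subsetSums, itemSum]
  | cons v l ih =>
    intro d hnd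
    obtain ⟨hn1, hs1⟩ := fold_shift v d.items d hnd
    obtain ⟨hn2, hs2⟩ := ih _ hn1
    refine ⟨hn2, fun P => ?_⟩
    simp only [List.foldl_cons]
    rw [hs2 P]
    simp only [subsetSums, List.map_append, List.map_map, List.sum_append]
    have step : ∀ u : Int, itemSum (fun s0 => P (s0 + u)) (d.items.foldl (dvb_shift v) d).items
        = itemSum (fun s0 => P (s0 + u)) d.items + itemSum (fun s0 => P (s0 + (u + v))) d.items := by
      intro u
      rw [hs1 (fun s0 => P (s0 + u))]
      congr 2
      funext s; rw [add_assoc, add_comm v u]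
    rw [List.map_congr_left (fun u _ => step u), PySem.List.sum_map_add_int]
    rw [add_comm]
    rfl

theorem counts_invariant (others : List Int) (P : Int → Bool) :
    itemSum P ((others.foldl (fun counts v => counts.items.foldl (dvb_shift v) counts)
        (PySem.Dict.ofList [(0, 1)])).items)
      = ((subsetSums others).countP P : Int) := by
  obtain ⟨-, hs⟩ := counts_fold others (PySem.Dict.ofList [(0, 1)])
    (PySem.Dict.nodup_keys_ofList _)
  rw [hs P]
  rw [show (PySem.Dict.ofList [((0:Int), (1:Int))]).items = [(0, 1)] from rfl]
  have h0 : ∀ u : Int, itemSum (fun s0 => P (s0 + u)) [(0, 1)] = if P u then 1 else 0 := by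
    intro u; simp [itemSum]
  rw [List.map_congr_left (fun u _ => h0 u)]
  exact PySem.List.sum_map_ite_one_zero P (subsetSums others)

-- A's loop, characterized: with j iterations left the list is drop j ++ take j,
-- and the iterations process the original indices j-1, …, 0
theorem A_loop (idxs : List Int) : ∀ (blocks acc : List Int),
    idxs.length ≤ blocks.length →
    idxs.foldl dvb_stepA (blocks.drop idxs.length ++ blocks.take idxs.length, acc)
      = (blocks, acc ++ ((List.range idxs.length).reverse.map
          (fun jj => deciding_count (blocks.drop (jj+1) ++ blocks.take jj) (blocks.getD jj 0) 0 0))) := by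
  induction idxs with
  | nil => intro blocks acc _; simp
  | cons x rest ih =>
    intro blocks acc h
    simp only [List.length_cons] at h ⊢
    have hr : rest.length < blocks.length := by omega
    have htake : blocks.take (rest.length + 1)
        = blocks.take rest.length ++ [blocks[rest.length]] := by
      rw [List.take_add_one, List.getElem?_eq_getElem hr]
      rfl
    have hpop : PySem.List.pop? (blocks.drop (rest.length + 1) ++ blocks.take (rest.length + 1))
        = some (blocks[rest.length], blocks.drop (rest.length + 1) ++ blocks.take rest.length) := by
      rw [htake, ← List.append_assoc]
      exact PySem.List.pop?_last _ _
    have hstep : dvb_stepA (blocks.drop (rest.length + 1) ++ blocks.take (rest.length + 1), acc) x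
        = (blocks.drop rest.length ++ blocks.take rest.length,
           acc ++ [deciding_count (blocks.drop (rest.length + 1) ++ blocks.take rest.length)
             blocks[rest.length] 0 0]) := by
      simp only [dvb_stepA, hpop]
      rw [PySem.List.insert_zero]
      congr 1
      rw [show blocks[rest.length] :: (blocks.drop (rest.length + 1) ++ blocks.take rest.length)
          = (blocks[rest.length] :: blocks.drop (rest.length + 1)) ++ blocks.take rest.length from rfl,
        List.getElem_cons_drop]
    rw [List.foldl_cons, hstep, ih blocks _ (le_of_lt hr)]
    rw [List.range_succ, List.reverse_append, List.reverse_singleton]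
    have hgd : blocks.getD rest.length 0 = blocks[rest.length] := List.getD_eq_getElem blocks 0 hr
    simp [List.getElem?_eq_getElem hr]

theorem A_eq_map (blocks : List Int) :
    deciding_votes_per_block blocks = (List.range blocks.length).map
      (fun jj => deciding_count (blocks.drop (jj+1) ++ blocks.take jj) (blocks.getD jj 0) 0 0) := by
  unfold deciding_votes_per_block
  have hlen : (PySem.List.pyRange 0 (blocks.length : Int) 1).length = blocks.length := by
    rw [PySem.List.length_pyRange_one]; simp
  have h := A_loop (PySem.List.pyRange 0 (blocks.length : Int) 1) blocks [] (by rw [hlen])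
  rw [hlen] at h
  simp only [List.drop_length, List.take_length, List.nil_append] at h
  rw [h]
  simp [List.map_reverse]

theorem B_entry_eq (blocks : List Int) (jj : Nat) (hjj : jj < blocks.length) :
    dvb_entry blocks (jj : Int)
      = deciding_count (blocks.drop (jj+1) ++ blocks.take jj) (blocks.getD jj 0) 0 0 := by
  have hc : PySem.List.pyGetD blocks (jj : Int) 0 = blocks.getD jj 0 :=
    PySem.List.pyGetD_natCast blocks jj 0
  have hsl1 : PySem.List.slice blocks none (some (jj : Int)) = blocks.take jj :=
    PySem.List.slice_to_natCast blocks jj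
  have hsl2 : PySem.List.slice blocks (some ((jj : Int) + 1)) none = blocks.drop (jj + 1) := by
    rw [show ((jj : Int) + 1) = ((jj + 1 : Nat) : Int) by push_cast; ring]
    exact PySem.List.slice_from_natCast blocks (jj + 1)
  set c := blocks.getD jj 0 with hcdef
  set others := blocks.take jj ++ blocks.drop (jj + 1) with hodef
  have hperm : (blocks.drop (jj+1) ++ blocks.take jj).Perm others := List.perm_append_comm
  have hbody : dvb_entry blocks (jj : Int)
      = itemSum (fun s => decide (others.sum - c ≤ 2 * s ∧ 2 * s ≤ others.sum + c))
          ((others.foldl (fun counts v => counts.items.foldl (dvb_shift v) counts)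
            (PySem.Dict.ofList [(0, 1)])).items) := by
    simp only [dvb_entry, hc, hsl1, hsl2, ← hodef]
    rw [show (fun (acc : Int) (p : Int × Int) =>
          if others.sum - c ≤ 2 * p.1 ∧ 2 * p.1 ≤ others.sum + c then acc + p.2 else acc)
        = (fun (acc : Int) (p : Int × Int) => acc +
            if (fun s => decide (others.sum - c ≤ 2 * s ∧ 2 * s ≤ others.sum + c)) p.1
            then p.2 else 0) from by funext acc p; split <;> simp_all]
    rw [PySem.List.foldl_add]
    simp [itemSum]
  rw [hbody, counts_invariant]
  rw [deciding_count_eq_countP]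
  rw [(subsetSums_perm hperm).countP_eq, hperm.sum_eq]
  congr 1
  refine List.countP_congr (fun s _ => ?_)
  simp only [okPred, decide_eq_true_eq]
  omega

-- ===== VERDICT (by name: the statement is the Claim_ definition above) =====
theorem deciding_votes_per_block_spec : Claim_equal_deciding_votes_per_block := by
  intro blocks _
  unfold Spec_deciding_votes_per_block
  rw [A_eq_map]
  unfold deciding_votes_per_block_alt
  rw [PySem.List.foldl_append_singleton_eq_map, List.nil_append]
  rw [PySem.List.pyRange_one]
  simp only [sub_zero, Int.toNat_natCast, List.map_map]
  refine List.map_congr_left (fun jj hjj => ?_)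
  have hjj' : jj < blocks.length := List.mem_range.mp hjj
  rw [Function.comp_apply, zero_add, B_entry_eq blocks jj hjj']
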